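-- pv_equiv track=rewrite | github.com/Ramzy22/serverside_pivot | dash_tanstack_pivot/pivot_engine/pivot_engine/incremental_ui_updates.py | _is_row_equal
-- ===== SOURCE A (Python) =====
-- def _is_row_equal(row1, row2):
--     """Check if two rows are equal for update purposes"""
--     if type(row1) != type(row2):
--         return False
--
--     if isinstance(row1, dict):
--         # Compare non-computed fields
--         for k, v in row1.items():
--             if not k.startswith('_') and row2.get(k) != v:
--                 return False
--         for k, v in row2.items():
--             if not k.startswith('_') and row1.get(k) != v:
--                 return False
--         return True
--
--     return row1 == row2
-- ===== SOURCE B (Python) =====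
-- def _is_row_equal(row1, row2):
--     """Check if two rows are equal for update purposes"""
--     if type(row1) != type(row2):
--         return False
--
--     if isinstance(row1, dict):
--         def visible(d):
--             return sorted(((k, v) for k, v in d.items() if not k.startswith('_')),
--                           key=lambda kv: kv[0])
--         return visible(row1) == visible(row2)
--
--     return row1 == row2
-- ===== Notes on version B (the rewrite author's own statement) =====
-- stated objective: alternative
-- what changed: Replaces A's two directional early-return lookup loops with a canonicalization: each dict is reduced to its non-underscore items sorted by key, and the two canonical lists are compared for equality (no dict lookups at all).
import Mathlib
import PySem

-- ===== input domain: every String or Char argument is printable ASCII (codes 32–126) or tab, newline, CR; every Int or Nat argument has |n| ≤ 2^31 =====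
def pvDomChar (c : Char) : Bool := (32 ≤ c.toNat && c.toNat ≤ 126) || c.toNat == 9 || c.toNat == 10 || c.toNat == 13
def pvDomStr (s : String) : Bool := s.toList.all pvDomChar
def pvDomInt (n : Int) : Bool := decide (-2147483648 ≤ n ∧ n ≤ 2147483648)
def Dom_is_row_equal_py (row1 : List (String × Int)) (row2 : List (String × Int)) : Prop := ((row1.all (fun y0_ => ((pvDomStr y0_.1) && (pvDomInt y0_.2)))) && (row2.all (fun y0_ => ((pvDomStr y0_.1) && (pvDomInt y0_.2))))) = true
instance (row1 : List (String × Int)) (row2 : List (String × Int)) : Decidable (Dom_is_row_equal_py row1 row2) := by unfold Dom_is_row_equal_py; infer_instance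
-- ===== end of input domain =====

-- B replaces A's two directional early-return lookup loops with canonicalization: each dict is
-- reduced to its non-underscore items sorted by key, and the two lists are compared (objective: alternative).


-- ===== PORT A =====
-- the 'for k, v in row.items(): if not k.startswith('_') and other.get(k) != v: return False' loop
def rowPairsOk (d : PySem.Dict String Int) : List (String × Int) → Bool
  | [] => true
  | (k, v) :: rest =>
      if !PySem.Str.startswith k "_" && (d.get? k != some v) then false
      else rowPairsOk d rest

-- both arguments are dicts here, so the 'type(row1) != type(row2)' guard and the non-dict
-- 'row1 == row2' fallback of the Python are vacuous and do not appear
def is_row_equal_py (row1 : List (String × Int)) (row2 : List (String × Int)) : Bool :=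
  if !rowPairsOk (PySem.Dict.mk row2) row1 then false
  else if !rowPairsOk (PySem.Dict.mk row1) row2 then false
  else true

-- ===== PORT B =====
-- visible(d): the non-underscore items of d, sorted by key
def visibleSorted (row : List (String × Int)) : List (String × Int) :=
  PySem.List.sorted (row.filter (fun p => !PySem.Str.startswith p.1 "_")) (fun p => p.1) false

def is_row_equal_py_alt (row1 : List (String × Int)) (row2 : List (String × Int)) : Bool :=
  visibleSorted row1 == visibleSorted row2

-- ===== PRECONDITION & SPEC =====
-- Pre_ requires each row's keys to be distinct: an association list with duplicate keys
-- represents no Python dict (dict keys are unique), so A is never run on such an input.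
def Pre_is_row_equal_py (row1 : List (String × Int)) (row2 : List (String × Int)) : Prop :=
  (row1.map Prod.fst).Nodup ∧ (row2.map Prod.fst).Nodup
instance (row1 : List (String × Int)) (row2 : List (String × Int)) : Decidable (Pre_is_row_equal_py row1 row2) := by unfold Pre_is_row_equal_py; infer_instance

def pvWitness_is_row_equal_py : (List (String × Int)) × (List (String × Int)) :=
  ([("a", 1), ("_x", 2)], [("a", 1)])

def Spec_is_row_equal_py (row1 : List (String × Int)) (row2 : List (String × Int)) (out : Bool) : Prop := out = is_row_equal_py_alt row1 row2
instance (row1 : List (String × Int)) (row2 : List (String × Int)) (out : Bool) : Decidable (Spec_is_row_equal_py row1 row2 out) := by unfold Spec_is_row_equal_py; infer_instance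

-- ===== CLAIM (what is proved, stated in full; the proofs are below) =====
def Claim_equal_is_row_equal_py : Prop := ∀ (row1 : List (String × Int)) (row2 : List (String × Int)), Dom_is_row_equal_py row1 row2 → Pre_is_row_equal_py row1 row2 → Spec_is_row_equal_py row1 row2 (is_row_equal_py row1 row2)

-- ===== LEMMAS AND PROOFS =====

-- A's directional loop succeeds iff every non-underscore entry of xs is found in d with that value
theorem rowPairsOk_iff (d : PySem.Dict String Int) (xs : List (String × Int)) :
    rowPairsOk d xs = true ↔
      ∀ p ∈ xs, PySem.Str.startswith p.1 "_" = false → d.get? p.1 = some p.2 := by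
  induction xs with
  | nil => simp [rowPairsOk]
  | cons p rest ih =>
      obtain ⟨k, v⟩ := p
      simp only [rowPairsOk]
      split_ifs with h
      · simp only [Bool.and_eq_true, Bool.not_eq_true', bne_iff_ne] at h
        simp only [false_iff, not_forall]
        exact ⟨(k, v), by simp, h.1, h.2⟩
      · rw [ih]
        constructor
        · rintro hrest q hq hu
          rcases List.mem_cons.mp hq with rfl | hq'
          · by_contra hne
            apply h
            simp only [Bool.and_eq_true, Bool.not_eq_true', bne_iff_ne]
            exact ⟨hu, hne⟩
          · exact hrest q hq' hu
        · intro hall q hq hu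
          exact hall q (List.mem_cons_of_mem _ hq) hu

theorem mk_get?_eq_some_iff (xs : List (String × Int)) (hn : (xs.map Prod.fst).Nodup)
    (k : String) (v : Int) :
    (PySem.Dict.mk xs).get? k = some v ↔ (k, v) ∈ xs := by
  have hkeys : (PySem.Dict.mk xs).keys.Nodup := by simpa using hn
  simpa using PySem.Dict.get?_eq_some_iff_mem_items (PySem.Dict.mk xs) k v hkeys

-- the filtered list keeps nodup keys
theorem visible_nodup (xs : List (String × Int)) (hn : (xs.map Prod.fst).Nodup) :
    ((xs.filter (fun p => !PySem.Str.startswith p.1 "_")).map Prod.fst).Nodup :=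
  hn.sublist (List.filter_sublist.map Prod.fst)

-- canonicalization is injective up to reordering: two nodup-key lists have the same
-- sorted form iff they are permutations of each other
theorem visibleSorted_eq_iff (xs ys : List (String × Int))
    (hy : ((ys.filter (fun p => !PySem.Str.startswith p.1 "_")).map Prod.fst).Nodup) :
    visibleSorted xs = visibleSorted ys ↔
      (xs.filter (fun p => !PySem.Str.startswith p.1 "_")).Perm
        (ys.filter (fun p => !PySem.Str.startswith p.1 "_")) := by
  set f1 := xs.filter (fun p => !PySem.Str.startswith p.1 "_") with hf1
  set f2 := ys.filter (fun p => !PySem.Str.startswith p.1 "_") with hf2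
  constructor
  · intro h
    have p1 : (visibleSorted xs).Perm f1 := PySem.List.sorted_perm f1 _ _
    have p2 : (visibleSorted ys).Perm f2 := PySem.List.sorted_perm f2 _ _
    exact (h ▸ p1).symm.trans p2
  · intro h
    have hperm : (visibleSorted ys).Perm f1 :=
      ((PySem.List.sorted_perm f2 _ _).trans h.symm)
    have hle : (visibleSorted ys).Pairwise (fun a b => a.1 ≤ b.1) :=
      PySem.List.sorted_pairwise f2 (fun p => p.1)
    have hnd : ((visibleSorted ys).map Prod.fst).Nodup := by
      have hp : (visibleSorted ys).Perm f2 := PySem.List.sorted_perm f2 _ _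
      exact (hp.map Prod.fst).nodup_iff.mpr hy
    have hne : (visibleSorted ys).Pairwise (fun a b => a.1 ≠ b.1) :=
      List.pairwise_map.mp hnd
    have hlt : (visibleSorted ys).Pairwise (fun a b => a.1 < b.1) := by
      have := hle.and hne
      exact this.imp (fun hab => lt_of_le_of_ne hab.1 hab.2)
    exact PySem.List.sorted_eq_of_perm_of_pairwise_lt f1 (visibleSorted ys) (fun p => p.1) hperm hlt

-- ===== VERDICT (by name: the statement is the Claim_ definition above) =====
theorem is_row_equal_py_spec : Claim_equal_is_row_equal_py := by
  intro row1 row2 _ hpre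
  obtain ⟨h1, h2⟩ := hpre
  unfold Spec_is_row_equal_py
  set f1 := row1.filter (fun p => !PySem.Str.startswith p.1 "_") with hf1
  set f2 := row2.filter (fun p => !PySem.Str.startswith p.1 "_") with hf2
  have hn1 := visible_nodup row1 h1
  have hn2 := visible_nodup row2 h2
  have key : (rowPairsOk (PySem.Dict.mk row2) row1 && rowPairsOk (PySem.Dict.mk row1) row2)
      = is_row_equal_py_alt row1 row2 := by
    rw [Bool.eq_iff_iff]
    simp only [Bool.and_eq_true, rowPairsOk_iff, is_row_equal_py_alt, beq_iff_eq]
    rw [visibleSorted_eq_iff row1 row2 hn2,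
      List.perm_ext_iff_of_nodup (hn1.of_map) (hn2.of_map)]
    have memf : ∀ (row : List (String × Int)) (p : String × Int),
        p ∈ row.filter (fun p => !PySem.Str.startswith p.1 "_") ↔
          p ∈ row ∧ PySem.Str.startswith p.1 "_" = false := by
      intro row p; simp [List.mem_filter]
    constructor
    · rintro ⟨ha, hb⟩ p
      rw [memf, memf]
      constructor
      · rintro ⟨hp, hu⟩
        exact ⟨(mk_get?_eq_some_iff row2 h2 p.1 p.2).mp (ha p hp hu), hu⟩
      · rintro ⟨hp, hu⟩
        exact ⟨(mk_get?_eq_some_iff row1 h1 p.1 p.2).mp (hb p hp hu), hu⟩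
    · intro hiff
      refine ⟨fun p hp hu => ?_, fun p hp hu => ?_⟩
      · have := ((hiff p).mp ((memf row1 p).mpr ⟨hp, hu⟩))
        exact (mk_get?_eq_some_iff row2 h2 p.1 p.2).mpr ((memf row2 p).mp this).1
      · have := ((hiff p).mpr ((memf row2 p).mpr ⟨hp, hu⟩))
        exact (mk_get?_eq_some_iff row1 h1 p.1 p.2).mpr ((memf row1 p).mp this).1
  rw [← key]
  unfold is_row_equal_py
  cases rowPairsOk (PySem.Dict.mk row2) row1 <;>
    cases rowPairsOk (PySem.Dict.mk row1) row2 <;> simp
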